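-- pv_equiv track=rewrite | github.com/OmarMUhammed03/Text2pose | bleu.py | ref_stats
-- ===== SOURCE A (Python) =====
-- from collections import Counter, namedtuple
--
-- NGRAM_ORDER = 4
--
-- def ref_stats(output, refs):
--     ngrams = Counter()
--     closest_diff = None
--     closest_len = None
--     for ref in refs:
--         tokens = ref.split()
--         reflen = len(tokens)
--         diff = abs(len(output.split()) - reflen)
--         if closest_diff is None or diff < closest_diff:
--             closest_diff = diff
--             closest_len = reflen
--         elif diff == closest_diff:
--             if reflen < closest_len:
--                 closest_len = reflen
--
--         ngrams_ref = extract_ngrams(ref)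
--         for ngram in ngrams_ref.keys():
--             ngrams[ngram] = max(ngrams[ngram], ngrams_ref[ngram])
--
--     return ngrams, closest_diff, closest_len
--
-- def extract_ngrams(line, min_order=1, max_order=NGRAM_ORDER) -> Counter:
--     """Extracts all the ngrams (min_order <= n <= max_order) from a sequence of tokens.
--
--     :param line: A segment containing a sequence of words.
--     :param min_order: Minimum n-gram length (default: 1).
--     :param max_order: Maximum n-gram length (default: NGRAM_ORDER).
--     :return: a dictionary containing ngrams and counts
--     """
--
--     ngrams = Counter()
--     tokens = line.split()
--     for n in range(min_order, max_order + 1):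
--         for i in range(0, len(tokens) - n + 1):
--             ngram = " ".join(tokens[i : i + n])
--             ngrams[ngram] += 1
--
--     return ngrams
-- ===== SOURCE B (Python) =====
-- from collections import Counter
--
-- NGRAM_ORDER = 4
--
-- def extract_ngrams(line, min_order=1, max_order=NGRAM_ORDER):
--     tokens = line.split()
--     return Counter(
--         " ".join(tokens[i : i + n])
--         for n in range(min_order, max_order + 1)
--         for i in range(len(tokens) - n + 1)
--     )
--
-- def ref_stats(output, refs):
--     if not refs:
--         return Counter(), None, None
--     olen = len(output.split())
--     closest_diff, closest_len = sorted(
--         (abs(olen - len(r.split())), len(r.split())) for r in refs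
--     )[0]
--     counters = [extract_ngrams(r) for r in refs]
--     groups = {}
--     for c in counters:
--         for g, n in c.items():
--             groups.setdefault(g, []).append(n)
--     merged = Counter({g: max(ns) for g, ns in groups.items()})
--     return merged, closest_diff, closest_len
-- ===== Notes on version B (the rewrite author's own statement) =====
-- stated objective: faster
-- what changed: Replaces A's single stateful pass (None-sentinel diff/tie-break updates and incremental per-reference max-merge into the running counter) by staged passes: an up-front empty-refs return, len(output.split()) computed once instead of once per reference, sorting the (diff, reflen) pairs and taking the head for the closest stats, and a group-then-aggregate merge (bucket every per-reference count per n-gram via setdefault, then take each bucket's max) instead of A's per-key max rewrites.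
import Mathlib
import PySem

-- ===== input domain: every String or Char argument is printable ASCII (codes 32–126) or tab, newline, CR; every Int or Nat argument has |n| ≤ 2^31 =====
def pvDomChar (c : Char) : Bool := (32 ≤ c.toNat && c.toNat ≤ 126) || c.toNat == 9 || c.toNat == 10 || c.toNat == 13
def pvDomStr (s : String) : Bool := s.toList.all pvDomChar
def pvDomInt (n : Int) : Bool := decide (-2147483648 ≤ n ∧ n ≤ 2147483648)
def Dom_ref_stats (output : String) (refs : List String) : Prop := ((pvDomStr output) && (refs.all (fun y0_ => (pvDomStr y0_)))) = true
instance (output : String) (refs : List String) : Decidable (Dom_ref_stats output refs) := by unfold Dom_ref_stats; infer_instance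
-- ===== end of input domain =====

-- B is a staged re-decomposition of A's single stateful pass: it splits `output` once instead of
-- once per reference (a timing run measured B faster for this reason), sorts the (diff, reflen)
-- pairs and takes the head instead of running A's sentinel/tie-break updates, and merges the n-gram
-- counts by grouping every per-reference count into a per-key bucket and taking each bucket's
-- maximum, instead of A's per-reference incremental max-merge.

-- ===== PORT A =====
def extract_ngrams (line : String) (min_order max_order : Int) : PySem.Dict String Int :=
  let tokens := PySem.Str.split₀ line
  (PySem.List.pyRange min_order (max_order + 1) 1).foldl (fun ngrams n =>
    (PySem.List.pyRange 0 ((tokens.length : Int) - n + 1) 1).foldl (fun ngrams i =>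
      ngrams.modify (PySem.Str.join " " (PySem.List.slice tokens (some i) (some (i + n)))) 0 (· + 1))
      ngrams)
    PySem.Dict.empty

def ref_stats (output : String) (refs : List String) : (List (String × Int)) × Option Int × Option Int :=
  let res := refs.foldl (fun (st : PySem.Dict String Int × Option Int × Option Int) ref =>
    let tokens := PySem.Str.split₀ ref
    let reflen : Int := tokens.length
    let diff : Int := |((PySem.Str.split₀ output).length : Int) - reflen|
    let closest :=
      match st.2 with
      | (none, _) => (some diff, some reflen)
      | (some cd, cl) =>
        if diff < cd then (some diff, some reflen)
        else if diff == cd then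
          match cl with
          | some clv => if reflen < clv then (some cd, some reflen) else (some cd, some clv)
          | none => (some cd, none)
        else (some cd, cl)
    let ngrams_ref := extract_ngrams ref 1 4
    let ngrams := ngrams_ref.keys.foldl (fun d k =>
      d.insert k (max (d.getD k 0) (ngrams_ref.getD k 0))) st.1
    (ngrams, closest)) (PySem.Dict.empty, none, none)
  (res.1.items, res.2.1, res.2.2)

-- ===== PORT B =====
def extract_ngrams_alt (line : String) (min_order max_order : Int) : PySem.Dict String Int :=
  let tokens := PySem.Str.split₀ line
  PySem.Dict.counter ((PySem.List.pyRange min_order (max_order + 1) 1).flatMap fun n =>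
    (PySem.List.pyRange 0 ((tokens.length : Int) - n + 1) 1).map fun i =>
      PySem.Str.join " " (PySem.List.slice tokens (some i) (some (i + n))))

def ref_stats_alt (output : String) (refs : List String) : (List (String × Int)) × Option Int × Option Int :=
  match refs with
  | [] => ([], none, none)
  | r :: rest =>
    let olen : Int := (PySem.Str.split₀ output).length
    let pairs := (r :: rest).map fun s =>
      let rl : Int := (PySem.Str.split₀ s).length
      (|olen - rl|, rl)
    -- sorted(...)[0]: the pair list is nonempty, so the pyGetD default is never used
    let best := PySem.List.pyGetD (PySem.List.sorted2 pairs Prod.fst Prod.snd) 0 (0, 0)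
    let counters := (r :: rest).map fun s => extract_ngrams_alt s 1 4
    let groups := counters.foldl (fun gr c =>
        c.items.foldl (fun gr p => gr.modify p.1 [] (· ++ [p.2])) gr)
      (PySem.Dict.empty : PySem.Dict String (List Int))
    -- {g: max(ns) for g, ns in groups.items()}: every bucket ns is nonempty, so the getD default is never used
    let merged := groups.items.map (fun p => (p.1, (PySem.List.max? p.2 (fun v => v)).getD 0))
    (merged, some best.1, some best.2)

-- ===== PRECONDITION & SPEC =====
def Spec_ref_stats (output : String) (refs : List String) (out : (List (String × Int)) × Option Int × Option Int) : Prop := out = ref_stats_alt output refs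
instance (output : String) (refs : List String) (out : (List (String × Int)) × Option Int × Option Int) : Decidable (Spec_ref_stats output refs out) := by unfold Spec_ref_stats; infer_instance

-- ===== CLAIM (what is proved, stated in full; the proofs are below) =====
def Claim_equal_ref_stats : Prop := ∀ (output : String) (refs : List String), Dom_ref_stats output refs → Spec_ref_stats output refs (ref_stats output refs)

-- ===== LEMMAS AND PROOFS =====

-- proof-only names for the two independent components of A's loop body
def aNgramStep (d : PySem.Dict String Int) (ref : String) : PySem.Dict String Int :=
  let c := extract_ngrams ref 1 4
  c.keys.foldl (fun d k => d.insert k (max (d.getD k 0) (c.getD k 0))) d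

def aClosestStep (output : String) (st : Option Int × Option Int) (ref : String) :
    Option Int × Option Int :=
  let reflen : Int := (PySem.Str.split₀ ref).length
  let diff : Int := |((PySem.Str.split₀ output).length : Int) - reflen|
  match st with
  | (none, _) => (some diff, some reflen)
  | (some cd, cl) =>
    if diff < cd then (some diff, some reflen)
    else if diff == cd then
      match cl with
      | some clv => if reflen < clv then (some cd, some reflen) else (some cd, some clv)
      | none => (some cd, none)
    else (some cd, cl)

-- the lexicographic strict order sorted2 compares with (fst, snd keys)
def lexLt (p q : Int × Int) : Bool := decide (p.1 < q.1) || (!decide (q.1 < p.1) && decide (p.2 < q.2))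

def bF (output : String) (s : String) : Int × Int :=
  let rl : Int := (PySem.Str.split₀ s).length
  (|((PySem.Str.split₀ output).length : Int) - rl|, rl)

-- proof-only names for the key list / per-key column maximum of the merged counters
def eN (r : String) : PySem.Dict String Int := extract_ngrams_alt r 1 4

def kOf (rs : List String) : List String := PySem.List.dedup (rs.flatMap fun r => (eN r).keys)

def vOf (rs : List String) (g : String) : Int := rs.foldl (fun m r => max m ((eN r).getD g 0)) 0

lemma ref_stats_loop (output : String) :
    ∀ (refs : List String) (d : PySem.Dict String Int) (p : Option Int × Option Int),
      refs.foldl (fun (st : PySem.Dict String Int × Option Int × Option Int) ref =>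
        let tokens := PySem.Str.split₀ ref
        let reflen : Int := tokens.length
        let diff : Int := |((PySem.Str.split₀ output).length : Int) - reflen|
        let closest :=
          match st.2 with
          | (none, _) => (some diff, some reflen)
          | (some cd, cl) =>
            if diff < cd then (some diff, some reflen)
            else if diff == cd then
              match cl with
              | some clv => if reflen < clv then (some cd, some reflen) else (some cd, some clv)
              | none => (some cd, none)
            else (some cd, cl)
        let ngrams_ref := extract_ngrams ref 1 4
        let ngrams := ngrams_ref.keys.foldl (fun d k =>
          d.insert k (max (d.getD k 0) (ngrams_ref.getD k 0))) st.1
        (ngrams, closest)) (d, p)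
      = (refs.foldl aNgramStep d, refs.foldl (aClosestStep output) p) := by
  intro refs
  induction refs with
  | nil => intro d p; rfl
  | cons x t ih =>
    intro d p
    rcases p with ⟨cd, cl⟩
    rw [List.foldl_cons, List.foldl_cons, List.foldl_cons]
    cases cd
    · exact ih _ _
    · exact ih _ _

lemma ref_stats_eq (output : String) (refs : List String) :
    ref_stats output refs =
      (((refs.foldl aNgramStep PySem.Dict.empty).items : List (String × Int)),
       refs.foldl (aClosestStep output) (none, none)) := by
  unfold ref_stats
  rw [ref_stats_loop output refs PySem.Dict.empty (none, none)]

lemma extract_eq (line : String) (mo Mo : Int) :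
    extract_ngrams line mo Mo = extract_ngrams_alt line mo Mo := by
  unfold extract_ngrams extract_ngrams_alt
  rw [PySem.Dict.counter_eq_foldl, List.foldl_flatMap]
  simp only [List.foldl_map]

lemma eN_nodup (r : String) : (eN r).keys.Nodup := by
  unfold eN extract_ngrams_alt; exact PySem.Dict.nodup_keys_counter _

lemma eN_getD_nonneg (r : String) (g : String) : 0 ≤ (eN r).getD g 0 := by
  unfold eN extract_ngrams_alt
  rw [PySem.Dict.getD_counter]
  positivity

-- A's per-reference max-merge loop, item-list form
lemma mergeA_items (w : String → Int) :
    ∀ (ks : List String) (d : PySem.Dict String Int), ks.Nodup → d.keys.Nodup →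
      (ks.foldl (fun d k => d.insert k (max (d.getD k 0) (w k))) d).items
        = d.items.map (fun p => if p.1 ∈ ks then (p.1, max p.2 (w p.1)) else p)
          ++ (ks.filter (fun k => !d.contains k)).map (fun k => (k, max 0 (w k))) := by
  intro ks
  induction ks with
  | nil => intro d _ _; simp
  | cons k rest ih =>
    intro d hks hd
    have hkrest : k ∉ rest := (List.nodup_cons.mp hks).1
    have hrest : rest.Nodup := (List.nodup_cons.mp hks).2
    rw [List.foldl_cons]
    have hd' : (d.insert k (max (d.getD k 0) (w k))).keys.Nodup :=
      PySem.Dict.nodup_keys_insert _ _ _ hd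
    rw [ih _ hrest hd']
    rcases Bool.eq_false_or_eq_true (d.contains k) with hc | hc
    case inr =>
      have hkd : k ∉ d.keys := by
        rw [PySem.Dict.contains_eq_decide_mem_keys] at hc
        simpa using hc
      rw [PySem.Dict.items_insert_of_not_contains _ _ hc]
      rw [PySem.Dict.getD_of_not_contains _ _ hc]
      rw [List.map_append, List.filter_cons]
      simp only [hc, Bool.not_false]
      have hmap : d.items.map (fun p => if p.1 ∈ rest then (p.1, max p.2 (w p.1)) else p)
          = d.items.map (fun p => if p.1 ∈ k :: rest then (p.1, max p.2 (w p.1)) else p) := by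
        apply List.map_congr_left
        intro p hp
        have hpk : p.1 ≠ k := by
          intro h
          exact hkd (h ▸ (by
            have : p.1 ∈ d.items.map (fun q => q.1) := List.mem_map_of_mem hp
            simpa [PySem.Dict.keys] using this))
        simp [hpk]
      have hfilt : (rest.filter fun x => !(d.insert k (max 0 (w k))).contains x)
          = rest.filter fun x => !d.contains x := by
        apply List.filter_congr
        intro x hx
        have hxk : x ≠ k := fun h => hkrest (h ▸ hx)
        rw [PySem.Dict.contains_insert]
        simp [hxk]
      rw [hfilt, hmap]
      simp [List.map_cons, List.append_assoc, hkrest]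
    case inl =>
      rw [PySem.Dict.items_insert_of_contains _ _ hc, List.map_map]
      congr 1
      · apply List.map_congr_left
        intro p hp
        by_cases hpk : p.1 = k
        · have hditem : (k, p.2) ∈ d.items := by rw [← hpk]; exact hp
          have hg : d.getD k 0 = p.2 := PySem.Dict.getD_of_mem_items _ hditem hd 0
          simp [Function.comp, hpk, hkrest, hg]
        · simp [Function.comp, hpk, beq_iff_eq]
      · rw [List.filter_cons]
        have hfilt : (rest.filter fun x => !(d.insert k (max (d.getD k 0) (w k))).contains x)
            = rest.filter fun x => !d.contains x := by
          apply List.filter_congr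
          intro x hx
          have hxk : x ≠ k := fun h => hkrest (h ▸ hx)
          rw [PySem.Dict.contains_insert]
          simp [hxk]
        rw [hfilt]
        simp [hc]

lemma vOf_nonneg (rs : List String) (g : String) : 0 ≤ vOf rs g := by
  unfold vOf
  exact (PySem.List.le_foldl_max_int rs (fun r => (eN r).getD g 0) 0).1

lemma vOf_append (rs : List String) (r : String) (g : String) :
    vOf (rs ++ [r]) g = max (vOf rs g) ((eN r).getD g 0) := by
  unfold vOf
  rw [List.foldl_append]
  rfl

lemma foldl_max_zero (f : String → Int) :
    ∀ rs : List String, (∀ r ∈ rs, f r = 0) → rs.foldl (fun m r => max m (f r)) 0 = 0 := by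
  intro rs
  induction rs with
  | nil => intro _; rfl
  | cons x t ih =>
    intro hz
    rw [List.foldl_cons, hz x (by simp), max_self]
    exact ih (fun r hr => hz r (by simp [hr]))

lemma vOf_of_not_mem_kOf (rs : List String) (g : String) (h : g ∉ kOf rs) :
    vOf rs g = 0 := by
  unfold kOf at h
  unfold vOf
  apply foldl_max_zero
  intro r hr
  have hg : g ∉ (eN r).keys := by
    intro hk
    exact h (by
      rw [PySem.List.dedup_eq_ofList, PySem.Set.mem_ofList]
      exact List.mem_flatMap.mpr ⟨r, hr, hk⟩)
  apply PySem.Dict.getD_of_not_contains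
  rw [PySem.Dict.contains_eq_decide_mem_keys]
  simpa using hg

lemma kOf_append (rs : List String) (r : String) :
    kOf (rs ++ [r]) = kOf rs ++ (eN r).keys.filter (fun g => !((kOf rs).contains g)) := by
  unfold kOf
  rw [List.flatMap_append]
  simp only [List.flatMap_cons, List.flatMap_nil, List.append_nil]
  rw [PySem.List.dedup_eq_ofList, PySem.List.dedup_eq_ofList, PySem.Set.ofList_append,
    PySem.Set.update_eq_append_filter, PySem.Set.ofList_eq_self_of_nodup _ (eN_nodup r)]
  simp [PySem.Set.contains_eq_listContains]

-- A's whole n-gram fold returns key/column-max items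
set_option maxHeartbeats 1600000 in
lemma A_items : ∀ rs : List String,
    (rs.foldl aNgramStep PySem.Dict.empty).items = (kOf rs).map (fun g => (g, vOf rs g)) := by
  intro rs
  induction rs using List.reverseRecOn with
  | nil => rfl
  | append_singleton rs r ih =>
    rw [List.foldl_append, List.foldl_cons, List.foldl_nil]
    generalize hd : rs.foldl aNgramStep PySem.Dict.empty = d at ih ⊢
    have hkeys : d.keys = kOf rs := by
      simp [PySem.Dict.keys, ih, Function.comp_def]
    have hnd : d.keys.Nodup := by
      rw [hkeys]; unfold kOf; rw [PySem.List.dedup_eq_ofList]; exact PySem.Set.nodup_ofList _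
    have hstep : aNgramStep d r
        = (eN r).keys.foldl (fun d k => d.insert k (max (d.getD k 0) ((eN r).getD k 0))) d := by
      unfold aNgramStep eN
      rw [extract_eq]
    have hm := mergeA_items (fun k => (eN r).getD k 0) (eN r).keys d (eN_nodup r) hnd
    beta_reduce at hm
    rw [hstep, hm, kOf_append, List.map_append, ih, List.map_map]
    refine congrArg₂ (· ++ ·) ?_ ?_
    · apply List.map_congr_left
      intro g hg
      rw [vOf_append]
      by_cases hmem : g ∈ (eN r).keys
      · simp [Function.comp, hmem]
      · have hz : (eN r).getD g 0 = 0 := by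
          apply PySem.Dict.getD_of_not_contains
          rw [PySem.Dict.contains_eq_decide_mem_keys]
          simpa using hmem
        simp [Function.comp, hmem, hz, max_eq_left (vOf_nonneg rs g)]
    · have hfilt : ((eN r).keys.filter (fun k => !d.contains k))
          = (eN r).keys.filter (fun g => !((kOf rs).contains g)) := by
        apply List.filter_congr
        intro x _
        rw [PySem.Dict.contains_eq_decide_mem_keys, hkeys]
        simp
      rw [hfilt]
      apply List.map_congr_left
      intro g hg
      have hgk : g ∉ kOf rs := by
        have := List.of_mem_filter hg
        simpa using this
      rw [vOf_append, vOf_of_not_mem_kOf rs g hgk]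

-- a counter with distinct keys contributes at most one pair per key
lemma items_filter_key (d : PySem.Dict String Int) (g : String) (hnd : d.keys.Nodup) :
    d.items.filter (fun p => p.1 == g)
      = if d.contains g then [(g, d.getD g 0)] else [] := by
  rw [PySem.Dict.items_eq_map_keys d hnd 0, List.filter_map]
  have hcomp : ((fun p : String × Int => p.1 == g) ∘ fun k => (k, d.getD k 0))
      = (fun k => k == g) := by
    funext k; rfl
  rw [hcomp, List.filter_beq, PySem.Dict.contains_eq_decide_mem_keys]
  by_cases hmem : g ∈ d.keys
  · rw [List.count_eq_one_of_mem hnd hmem]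
    simp [hmem]
  · rw [List.count_eq_zero_of_not_mem hmem]
    simp [hmem]

lemma flat_filter (g : String) : ∀ rs : List String,
    ((rs.flatMap (fun s => (eN s).items)).filter (fun p => p.1 == g)).map (fun p => p.2)
      = rs.flatMap (fun s => if (eN s).contains g then [(eN s).getD g 0] else []) := by
  intro rs
  induction rs with
  | nil => rfl
  | cons s t ih =>
    rw [List.flatMap_cons, List.flatMap_cons, List.filter_append, List.map_append, ih,
      items_filter_key (eN s) g (eN_nodup s)]
    by_cases hc : (eN s).contains g
    · simp [hc]
    · simp [hc]

lemma max_chain (g : String) : ∀ (rs : List String) (a : Int), 0 ≤ a →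
    (rs.flatMap (fun s => if (eN s).contains g then [(eN s).getD g 0] else [])).foldl max a
      = rs.foldl (fun m s => max m ((eN s).getD g 0)) a := by
  intro rs
  induction rs with
  | nil => intro a _; rfl
  | cons s t ih =>
    intro a ha
    rw [List.flatMap_cons, List.foldl_append, List.foldl_cons]
    by_cases hc : (eN s).contains g
    · rw [if_pos hc]
      exact ih (max a ((eN s).getD g 0)) (le_trans ha (le_max_left _ _))
    · rw [if_neg hc,
        PySem.Dict.getD_of_not_contains _ _ (by simpa using hc), max_eq_left ha]
      exact ih a ha

lemma maxgetD (ns : List Int) (h : ∀ v ∈ ns, 0 ≤ v) :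
    (PySem.List.max? ns (fun v => v)).getD 0 = ns.foldl max 0 := by
  cases ns with
  | nil => rfl
  | cons x t =>
    rw [PySem.List.max?_id_cons, Option.getD_some, List.foldl_cons,
      max_eq_right (h x (by simp))]

-- B's grouped per-key maxima are the same items
set_option maxHeartbeats 1600000 in
lemma B_items (r : String) (rest : List String) :
    ((((r :: rest).map fun s => extract_ngrams_alt s 1 4).foldl (fun gr c =>
        c.items.foldl (fun gr p => gr.modify p.1 [] (· ++ [p.2])) gr)
        (PySem.Dict.empty : PySem.Dict String (List Int))).items.map
          (fun p => (p.1, (PySem.List.max? p.2 (fun v => v)).getD 0)))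
      = (kOf (r :: rest)).map (fun g => (g, vOf (r :: rest) g)) := by
  have hflat : (((r :: rest).map fun s => extract_ngrams_alt s 1 4).foldl (fun gr c =>
        c.items.foldl (fun gr p => gr.modify p.1 [] (· ++ [p.2])) gr)
        (PySem.Dict.empty : PySem.Dict String (List Int)))
      = ((r :: rest).flatMap (fun s => (eN s).items)).foldl
          (fun gr p => gr.modify p.1 [] (· ++ [p.2]))
          (PySem.Dict.empty : PySem.Dict String (List Int)) := by
    rw [← List.foldl_flatMap, List.flatMap_map]
    rfl
  rw [hflat]
  generalize hF : (r :: rest).flatMap (fun s => (eN s).items) = F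
  have hkeys : (F.foldl (fun gr p => gr.modify p.1 [] (· ++ [p.2]))
        (PySem.Dict.empty : PySem.Dict String (List Int))).keys = kOf (r :: rest) := by
    rw [PySem.Dict.keys_foldl_modify_key, PySem.Dict.keys_empty,
      PySem.Set.update_nil_left]
    unfold kOf
    rw [PySem.List.dedup_eq_ofList, ← hF, List.map_flatMap]
    rfl
  have hnd : (F.foldl (fun gr p => gr.modify p.1 [] (· ++ [p.2]))
        (PySem.Dict.empty : PySem.Dict String (List Int))).keys.Nodup :=
    PySem.Dict.nodup_keys_foldl_modify_key F Prod.fst [] (fun _ p => (· ++ [p.2]))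
      PySem.Dict.empty (by simp [PySem.Dict.keys_empty])
  rw [PySem.Dict.items_eq_map_keys _ hnd [], hkeys, List.map_map]
  apply List.map_congr_left
  intro g _
  have hgetD : (F.foldl (fun gr p => gr.modify p.1 [] (· ++ [p.2]))
        (PySem.Dict.empty : PySem.Dict String (List Int))).getD g []
      = (F.filter (fun p => p.1 == g)).map (fun p => p.2) := by
    rw [PySem.Dict.getD_foldl_modify_append, PySem.Dict.getD_empty, List.nil_append]
  have hns : (F.filter (fun p => p.1 == g)).map (fun p => p.2)
      = (r :: rest).flatMap (fun s => if (eN s).contains g then [(eN s).getD g 0] else []) := by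
    rw [← hF]; exact flat_filter g (r :: rest)
  have hpos : ∀ v ∈ (r :: rest).flatMap (fun s => if (eN s).contains g then [(eN s).getD g 0] else []),
      0 ≤ v := by
    intro v hv
    obtain ⟨s, _, hvs⟩ := List.mem_flatMap.mp hv
    by_cases hc : (eN s).contains g
    · rw [if_pos hc] at hvs
      simp only [List.mem_singleton] at hvs
      exact hvs ▸ eN_getD_nonneg s g
    · rw [if_neg hc] at hvs
      simp at hvs
  simp only [Function.comp_apply]
  rw [hgetD, hns, maxgetD _ hpos, max_chain g (r :: rest) 0 le_rfl]
  rfl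

lemma head?_foldl_insertBy {α : Type} (lt : α → α → Bool) :
    ∀ (xs : List α) (h : α) (t : List α),
      (xs.foldl (fun acc x => PySem.List.insertBy lt x acc) (h :: t)).head?
        = some (xs.foldl (fun c q => if lt q c then q else c) h) := by
  intro xs
  induction xs with
  | nil => intro h t; rfl
  | cons x rest ih =>
    intro h t
    rw [List.foldl_cons, List.foldl_cons]
    have hins : PySem.List.insertBy lt x (h :: t)
        = if lt x h then x :: h :: t else h :: PySem.List.insertBy lt x t := rfl
    by_cases hx : lt x h
    · rw [hins, if_pos hx, if_pos hx]; exact ih x (h :: t)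
    · rw [hins, if_neg hx, if_neg hx]; exact ih h (PySem.List.insertBy lt x t)

lemma sorted2_head (p : Int × Int) (ps : List (Int × Int)) :
    (PySem.List.sorted2 (p :: ps) Prod.fst Prod.snd).head?
      = some (ps.foldl (fun c q => if lexLt q c then q else c) p) := by
  have h1 : PySem.List.sorted2 (p :: ps) Prod.fst Prod.snd
      = (p :: ps).foldl (fun acc x => PySem.List.insertBy lexLt x acc) [] := rfl
  rw [h1, List.foldl_cons]
  exact head?_foldl_insertBy lexLt ps p []

lemma closest_step (output : String) (c : Int × Int) (x : String) :
    aClosestStep output (some c.1, some c.2) x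
      = (some (if lexLt (bF output x) c then bF output x else c).1,
         some (if lexLt (bF output x) c then bF output x else c).2) := by
  unfold aClosestStep bF lexLt
  simp only [beq_iff_eq]
  split_ifs <;> simp_all <;> omega

lemma closest_fold (output : String) :
    ∀ (t : List String) (c : Int × Int),
      t.foldl (aClosestStep output) (some c.1, some c.2)
        = (some ((t.map (bF output)).foldl (fun c q => if lexLt q c then q else c) c).1,
           some ((t.map (bF output)).foldl (fun c q => if lexLt q c then q else c) c).2) := by
  intro t
  induction t with
  | nil => intro c; rfl
  | cons x rest ih =>
    intro c
    rw [List.foldl_cons, closest_step, List.map_cons, List.foldl_cons]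
    exact ih _

lemma closest_first (output r : String) :
    aClosestStep output (none, none) r = (some (bF output r).1, some (bF output r).2) := rfl

-- ===== VERDICT (by name: the statement is the Claim_ definition above) =====
theorem ref_stats_spec : Claim_equal_ref_stats := by
  intro output refs _
  unfold Spec_ref_stats
  cases refs with
  | nil => rfl
  | cons r rest =>
    rw [ref_stats_eq]
    show _ = ref_stats_alt output (r :: rest)
    simp only [ref_stats_alt]
    have hclosest : (r :: rest).foldl (aClosestStep output) (none, none)
        = (some ((rest.map (bF output)).foldl (fun c q => if lexLt q c then q else c) (bF output r)).1,
           some ((rest.map (bF output)).foldl (fun c q => if lexLt q c then q else c) (bF output r)).2) := by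
      rw [List.foldl_cons, closest_first, closest_fold]
    have hpairs : ((r :: rest).map fun s =>
        ((|((PySem.Str.split₀ output).length : Int) - ((PySem.Str.split₀ s).length : Int)|,
          ((PySem.Str.split₀ s).length : Int)) : Int × Int))
        = bF output r :: rest.map (bF output) := by
      rw [List.map_cons]; rfl
    have hbest : PySem.List.pyGetD (PySem.List.sorted2 (bF output r :: rest.map (bF output)) Prod.fst Prod.snd) 0 ((0 : Int), (0 : Int))
        = (rest.map (bF output)).foldl (fun c q => if lexLt q c then q else c) (bF output r) := by
      rw [PySem.List.pyGetD_zero, List.getD_eq_getElem?_getD, ← List.head?_eq_getElem?,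
        sorted2_head, Option.getD_some]
    rw [hclosest, A_items]
    rw [hpairs, hbest]
    rw [B_items r rest]
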